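-- pv_equiv track=rewrite | github.com/barseghyanartur/MinishLab__semble | src/semble/ranking/boosting.py | _fuzzy_keyword_overlap
-- ===== SOURCE A (Python) =====
-- def _fuzzy_keyword_overlap(keywords: set[str], parts: set[str]) -> int:
--     """Count query keywords that match path parts, allowing prefix overlap (min 3 chars)."""
--     exact = keywords & parts
--     if len(exact) == len(keywords):
--         return len(exact)
--     n_matches = len(exact)
--     for keyword in keywords - exact:
--         for part in parts:
--             shorter, longer = (keyword, part) if len(keyword) <= len(part) else (part, keyword)
--             if len(shorter) >= 3 and longer.startswith(shorter):
--                 n_matches += 1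
--                 break
--     return n_matches
-- ===== SOURCE B (Python) =====
-- def _fuzzy_keyword_overlap(keywords: set[str], parts: set[str]) -> int:
--     """Count query keywords that match path parts, allowing prefix overlap (min 3 chars)."""
--     part_prefixes = {p[:i] for p in parts for i in range(3, len(p) + 1)}
--     n_matches = 0
--     for keyword in keywords:
--         if (keyword in parts
--                 or keyword in part_prefixes
--                 or any(keyword[:i] in parts for i in range(3, len(keyword)))):
--             n_matches += 1
--     return n_matches
-- ===== Notes on version B (the rewrite author's own statement) =====
-- stated objective: faster
-- what changed: Replaces the nested keyword-by-part scan with a precomputed set of all length>=3 prefixes of the parts, so each keyword is decided by O(len) set lookups instead of comparing it against every part.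
import Mathlib
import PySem

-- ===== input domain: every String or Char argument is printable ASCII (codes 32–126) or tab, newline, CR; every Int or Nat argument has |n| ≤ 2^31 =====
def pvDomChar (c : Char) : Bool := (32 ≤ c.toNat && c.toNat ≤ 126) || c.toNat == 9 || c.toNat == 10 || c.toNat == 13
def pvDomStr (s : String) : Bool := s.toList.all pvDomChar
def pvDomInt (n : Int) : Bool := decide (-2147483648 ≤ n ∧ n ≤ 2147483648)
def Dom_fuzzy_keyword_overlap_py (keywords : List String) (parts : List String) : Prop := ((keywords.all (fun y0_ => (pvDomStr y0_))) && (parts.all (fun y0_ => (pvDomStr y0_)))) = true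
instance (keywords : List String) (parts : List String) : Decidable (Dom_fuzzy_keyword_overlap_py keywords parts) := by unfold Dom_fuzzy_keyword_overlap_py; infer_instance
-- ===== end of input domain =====

-- B replaces A's nested keyword×part scan by a precomputed set of all length-≥3 prefixes
-- of the parts plus per-keyword prefix lookups (objective: faster).
-- The Python arguments are sets; per the type convention they arrive as lists and both
-- ports take set(...) of them; the count returned never depends on set iteration order.

-- ===== PORT A =====
-- inner-loop body of A: 'shorter, longer = ...; len(shorter) >= 3 and longer.startswith(shorter)'
def fuzzyMatchA (keyword part : String) : Bool :=
  let sl := if PySem.Str.len keyword ≤ PySem.Str.len part then (keyword, part) else (part, keyword)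
  decide (3 ≤ PySem.Str.len sl.1) && PySem.Str.startswith sl.2 sl.1

def fuzzy_keyword_overlap_py (keywords : List String) (parts : List String) : Int :=
  let kset : PySem.Set String := PySem.Set.ofList keywords
  let pset : PySem.Set String := PySem.Set.ofList parts
  let exact := PySem.Set.inter kset pset
  if PySem.Set.len exact = PySem.Set.len kset then PySem.Set.len exact
  else
    -- 'for keyword in keywords - exact: for part in parts: ... break' — the break on the
    -- first matching part adds exactly 1 when some part matches: List.any
    (PySem.Set.diff kset exact).foldl
      (fun n_matches keyword =>
        if (pset : List String).any (fun part => fuzzyMatchA keyword part)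
        then n_matches + 1 else n_matches)
      (PySem.Set.len exact)

-- ===== PORT B =====
-- '{p[:i] for p in parts for i in range(3, len(p) + 1)}' ; p[:i] with i ≥ 3 is take i (exact)
def partPrefixesB (pset : PySem.Set String) : PySem.Set String :=
  PySem.Set.ofList ((pset : List String).flatMap (fun p =>
    (PySem.List.pyRange 3 (PySem.Str.len p + 1) 1).map
      (fun i => String.ofList (p.toList.take i.toNat))))

-- B's per-keyword test: 'keyword in parts or keyword in part_prefixes or any(keyword[:i] in parts ...)'
def altHitB (pset prefs : PySem.Set String) (keyword : String) : Bool :=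
  PySem.Set.contains pset keyword || PySem.Set.contains prefs keyword ||
    (PySem.List.pyRange 3 (PySem.Str.len keyword) 1).any
      (fun i => PySem.Set.contains pset (String.ofList (keyword.toList.take i.toNat)))

def fuzzy_keyword_overlap_py_alt (keywords : List String) (parts : List String) : Int :=
  let pset : PySem.Set String := PySem.Set.ofList parts
  let part_prefixes := partPrefixesB pset
  (PySem.Set.ofList keywords).foldl
    (fun n_matches keyword =>
      if altHitB pset part_prefixes keyword then n_matches + 1 else n_matches)
    0

-- ===== PRECONDITION & SPEC =====
def Spec_fuzzy_keyword_overlap_py (keywords : List String) (parts : List String) (out : Int) : Prop := out = fuzzy_keyword_overlap_py_alt keywords parts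
instance (keywords : List String) (parts : List String) (out : Int) : Decidable (Spec_fuzzy_keyword_overlap_py keywords parts out) := by unfold Spec_fuzzy_keyword_overlap_py; infer_instance

-- ===== CLAIM (what is proved, stated in full; the proofs are below) =====
def Claim_equal_fuzzy_keyword_overlap_py : Prop := ∀ (keywords : List String) (parts : List String), Dom_fuzzy_keyword_overlap_py keywords parts → Spec_fuzzy_keyword_overlap_py keywords parts (fuzzy_keyword_overlap_py keywords parts)

-- ===== LEMMAS AND PROOFS =====

-- [c ∨ a] = [c] + [a ∧ ¬c], counted over a list
theorem countP_or_split {α : Type} (c a : α → Bool) (l : List α) :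
    l.countP (fun x => c x || a x) = l.countP c + l.countP (fun x => a x && !c x) := by
  induction l with
  | nil => simp
  | cons x xs ih =>
    by_cases hc : c x <;> by_cases ha : a x <;>
      simp [hc, ha, ih] <;> omega

-- A's inner condition, as a proposition about list prefixes
theorem fuzzyMatchA_iff (k p : String) :
    fuzzyMatchA k p = true ↔
      (3 ≤ k.toList.length ∧ k.toList.length ≤ p.toList.length ∧ k.toList <+: p.toList) ∨
      (3 ≤ p.toList.length ∧ p.toList.length < k.toList.length ∧ p.toList <+: k.toList) := by
  unfold fuzzyMatchA
  simp only [PySem.Str.len, PySem.Str.startswith, PySem.Chars.startswith]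
  split_ifs with h
  · have hn : k.toList.length ≤ p.toList.length := by exact_mod_cast h
    simp only [Bool.and_eq_true, decide_eq_true_eq, List.isPrefixOf_iff_prefix]
    constructor
    · rintro ⟨h3, hp⟩
      exact Or.inl ⟨by exact_mod_cast h3, hn, hp⟩
    · rintro (⟨h3, _, hp⟩ | ⟨_, hlt, _⟩)
      · exact ⟨by exact_mod_cast h3, hp⟩
      · omega
  · have hn : p.toList.length < k.toList.length := by
      have := lt_of_not_ge h; exact_mod_cast this
    simp only [Bool.and_eq_true, decide_eq_true_eq, List.isPrefixOf_iff_prefix]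
    constructor
    · rintro ⟨h3, hp⟩
      exact Or.inr ⟨by exact_mod_cast h3, hn, hp⟩
    · rintro (⟨_, hle, _⟩ | ⟨h3, _, hp⟩)
      · omega
      · exact ⟨by exact_mod_cast h3, hp⟩

-- membership in B's prefix set
theorem mem_partPrefixesB (pset : List String) (k : String) :
    k ∈ partPrefixesB pset ↔
      ∃ p ∈ pset, 3 ≤ k.toList.length ∧ k.toList.length ≤ p.toList.length ∧ k.toList <+: p.toList := by
  unfold partPrefixesB
  rw [PySem.Set.mem_ofList]
  simp only [List.mem_flatMap, List.mem_map, PySem.Str.len]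
  constructor
  · rintro ⟨p, hp, i, hi, rfl⟩
    rw [PySem.List.mem_pyRange_iff_of_pos (by norm_num)] at hi
    obtain ⟨h3, hlt, -⟩ := hi
    refine ⟨p, hp, ?_, ?_, ?_⟩
    · rw [String.toList_ofList, List.length_take]; omega
    · rw [String.toList_ofList, List.length_take]; omega
    · rw [String.toList_ofList]; exact List.take_prefix _ _
  · rintro ⟨p, hp, h3, hle, hpre⟩
    refine ⟨p, hp, (k.toList.length : Int), ?_, ?_⟩
    · rw [PySem.List.mem_pyRange_iff_of_pos (by norm_num)]
      exact ⟨by exact_mod_cast h3, by omega, one_dvd _⟩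
    · rw [List.prefix_iff_eq_take] at hpre
      simp only [Int.toNat_natCast]
      rw [← hpre, String.ofList_toList]

-- B's strict-prefix loop over range(3, len(keyword))
theorem strict_loop_iff (pset : List String) (k : String) :
    ((PySem.List.pyRange 3 (PySem.Str.len k) 1).any
      (fun i => PySem.Set.contains pset (String.ofList (k.toList.take i.toNat))) = true) ↔
      ∃ p ∈ pset, 3 ≤ p.toList.length ∧ p.toList.length < k.toList.length ∧ p.toList <+: k.toList := by
  simp only [List.any_eq_true, PySem.Set.contains_iff, PySem.Str.len]
  constructor
  · rintro ⟨i, hi, hmem⟩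
    rw [PySem.List.mem_pyRange_iff_of_pos (by norm_num)] at hi
    obtain ⟨h3, hlt, -⟩ := hi
    refine ⟨_, hmem, ?_, ?_, ?_⟩
    · rw [String.toList_ofList, List.length_take]; omega
    · rw [String.toList_ofList, List.length_take]; omega
    · rw [String.toList_ofList]; exact List.take_prefix _ _
  · rintro ⟨p, hp, h3, hlt, hpre⟩
    refine ⟨(p.toList.length : Int), ?_, ?_⟩
    · rw [PySem.List.mem_pyRange_iff_of_pos (by norm_num)]
      exact ⟨by exact_mod_cast h3, by omega, one_dvd _⟩
    · rw [List.prefix_iff_eq_take] at hpre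
      simp only [Int.toNat_natCast]
      rw [← hpre, String.ofList_toList]
      exact hp

-- pointwise agreement of the two per-keyword tests
theorem pointwise (pset : List String) (k : String) :
    (PySem.Set.contains pset k || pset.any (fun part => fuzzyMatchA k part)) =
      altHitB pset (partPrefixesB pset) k := by
  unfold altHitB
  rw [Bool.eq_iff_iff]
  simp only [Bool.or_eq_true, PySem.Set.contains_iff, strict_loop_iff, mem_partPrefixesB]
  simp only [List.any_eq_true, fuzzyMatchA_iff]
  constructor
  · rintro (hk | ⟨p, hp, h | h⟩)
    · exact Or.inl (Or.inl hk)
    · exact Or.inl (Or.inr ⟨p, hp, h⟩)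
    · exact Or.inr ⟨p, hp, h⟩
  · rintro ((hk | ⟨p, hp, h⟩) | ⟨p, hp, h⟩)
    · exact Or.inl hk
    · exact Or.inr ⟨p, hp, Or.inl h⟩
    · exact Or.inr ⟨p, hp, Or.inr h⟩

-- diff kset exact filters kset by non-membership in pset
theorem diff_inter_eq (kset pset : List String) :
    PySem.Set.diff kset (PySem.Set.inter kset pset) =
      kset.filter (fun x => !(PySem.Set.contains pset x)) := by
  unfold PySem.Set.diff PySem.Set.inter
  refine List.filter_congr (fun x hx => ?_)
  congr 1
  rw [Bool.eq_iff_iff, PySem.Set.contains_iff, PySem.Set.contains_iff, List.mem_filter]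
  simp [hx]

-- A as a single count over set(keywords)
theorem A_as_count (keywords parts : List String) :
    fuzzy_keyword_overlap_py keywords parts =
      ((PySem.Set.ofList keywords).countP (fun kw =>
        PySem.Set.contains (PySem.Set.ofList parts) kw ||
          (PySem.Set.ofList parts).any (fun part => fuzzyMatchA kw part)) : Int) := by
  unfold fuzzy_keyword_overlap_py
  set kset := PySem.Set.ofList keywords with hk
  set pset := PySem.Set.ofList parts with hp
  have hcount : ∀ l : List String,
      l.foldl (fun n kw => if pset.any (fun part => fuzzyMatchA kw part) then n + 1 else n)
        (PySem.Set.len (PySem.Set.inter kset pset)) =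
      PySem.Set.len (PySem.Set.inter kset pset) +
        (l.countP (fun kw => pset.any (fun part => fuzzyMatchA kw part)) : Int) :=
    fun l => PySem.List.foldl_if_add_one _ l _
  have hlen : PySem.Set.len (PySem.Set.inter kset pset) =
      (kset.countP (fun x => PySem.Set.contains pset x) : Int) := by
    unfold PySem.Set.len PySem.Set.inter
    rw [← List.countP_eq_length_filter]
  have hsplit :
      PySem.Set.len (PySem.Set.inter kset pset) +
        ((PySem.Set.diff kset (PySem.Set.inter kset pset)).countP
          (fun kw => pset.any (fun part => fuzzyMatchA kw part)) : Int) =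
      (kset.countP (fun kw =>
        PySem.Set.contains pset kw || pset.any (fun part => fuzzyMatchA kw part)) : Int) := by
    rw [hlen, diff_inter_eq, List.countP_filter, countP_or_split]
    push_cast
    ring
  by_cases hif : PySem.Set.len (PySem.Set.inter kset pset) = PySem.Set.len kset
  · rw [if_pos hif]
    -- equal sizes force exact = kset, so the diff is empty and the count adds nothing
    have hexact : PySem.Set.inter kset pset = kset := by
      refine List.Sublist.eq_of_length List.filter_sublist ?_
      unfold PySem.Set.len at hif
      exact_mod_cast hif
    have hnil : PySem.Set.diff kset (PySem.Set.inter kset pset) = [] := by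
      rw [hexact]
      unfold PySem.Set.diff
      refine List.filter_eq_nil_iff.mpr (fun x hx => ?_)
      simp [hx]
    rw [← hsplit, hnil]
    simp
  · rw [if_neg hif, hcount, hsplit]

-- B as a single count over set(keywords)
theorem B_as_count (keywords parts : List String) :
    fuzzy_keyword_overlap_py_alt keywords parts =
      ((PySem.Set.ofList keywords).countP
        (altHitB (PySem.Set.ofList parts) (partPrefixesB (PySem.Set.ofList parts))) : Int) := by
  unfold fuzzy_keyword_overlap_py_alt
  rw [PySem.List.foldl_if_add_one]
  simp

-- ===== VERDICT (by name: the statement is the Claim_ definition above) =====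
theorem fuzzy_keyword_overlap_py_spec : Claim_equal_fuzzy_keyword_overlap_py := by
  intro keywords parts _
  unfold Spec_fuzzy_keyword_overlap_py
  rw [A_as_count, B_as_count]
  norm_cast
  exact List.countP_congr (fun x _ => by rw [pointwise])
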